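-- pv_equiv track=rewrite | github.com/sxl19971024/distributed_gpu | distributed_gpu/resource_planner.py | _compute_batch_sizes
-- ===== SOURCE A (Python) =====
-- import math
-- from typing import Dict, List, Optional, Sequence, Tuple
--
-- def _compute_batch_sizes(total_dim: int, batch_dim_size: int) -> List[int]:
--     """沿某一维度计算分批大小列表"""
--     num_batches = math.ceil(total_dim / batch_dim_size)
--     sizes: List[int] = []
--     remaining = total_dim
--     for _ in range(num_batches):
--         bs = min(batch_dim_size, remaining)
--         sizes.append(bs)
--         remaining -= bs
--     return sizes
-- ===== SOURCE B (Python) =====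
-- import math
--
--
-- def _compute_batch_sizes(total_dim: int, batch_dim_size: int) -> list:
--     """Closed form: (num_batches-1) full batches plus the remainder batch."""
--     num_batches = math.ceil(total_dim / batch_dim_size)
--     if num_batches <= 0:
--         return []
--     full = num_batches - 1
--     return [batch_dim_size] * full + [total_dim - batch_dim_size * full]
-- ===== Notes on version B (the rewrite author's own statement) =====
-- stated objective: simpler
-- what changed: Replaces the subtract-and-append loop over a running 'remaining' by a closed form: (num_batches-1) copies of batch_dim_size plus one remainder element.
-- intended difference: When total_dim and batch_dim_size are both negative (and unequal), A's min-based loop returns an accidental list such as [-10,-3,-3,-3] for (-10,-3) whose first element overshoots, while B returns [-3,-3,-3,-1]: full batches of batch_dim_size plus a remainder that still sums to total_dim, which is the intended splitting. — e.g. on _compute_batch_sizes(-10, -3): A returns [-10, -3, -3, -3], B returns [-3, -3, -3, -1]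
import Mathlib
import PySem

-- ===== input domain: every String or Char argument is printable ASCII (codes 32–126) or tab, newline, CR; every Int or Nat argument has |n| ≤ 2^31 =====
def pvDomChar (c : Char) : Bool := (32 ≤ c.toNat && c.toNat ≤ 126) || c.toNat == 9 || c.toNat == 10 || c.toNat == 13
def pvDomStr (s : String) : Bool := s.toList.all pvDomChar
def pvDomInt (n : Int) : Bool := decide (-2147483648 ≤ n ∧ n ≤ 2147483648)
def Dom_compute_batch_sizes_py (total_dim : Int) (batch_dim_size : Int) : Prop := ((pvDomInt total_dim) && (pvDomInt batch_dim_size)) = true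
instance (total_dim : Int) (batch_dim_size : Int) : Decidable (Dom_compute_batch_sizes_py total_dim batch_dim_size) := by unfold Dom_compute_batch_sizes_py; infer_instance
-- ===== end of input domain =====

-- B replaces A's subtract-and-append loop by a closed form (full batches + remainder);
-- on both-negative inputs B returns the intended splitting (see D_ below).
-- ===== PORT A =====
-- math.ceil(total_dim / batch_dim_size): on Dom (|args| ≤ 2^31) Python's float division
-- followed by ceil equals exact ceiling division -((-a) // b), ported as such.
def compute_batch_sizes_py (total_dim : Int) (batch_dim_size : Int) : List Int :=
  let num_batches : Int := -(PySem.Int.floordiv (-total_dim) batch_dim_size)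
  ((PySem.List.pyRange 0 num_batches 1).foldl
    (fun (st : List Int × Int) _ =>
      let bs := min batch_dim_size st.2
      (st.1 ++ [bs], st.2 - bs))
    ([], total_dim)).1

-- ===== PORT B =====
def compute_batch_sizes_py_alt (total_dim : Int) (batch_dim_size : Int) : List Int :=
  let num_batches : Int := -(PySem.Int.floordiv (-total_dim) batch_dim_size)
  if num_batches ≤ 0 then []
  else
    let full := num_batches - 1
    List.replicate full.toNat batch_dim_size ++ [total_dim - batch_dim_size * full]

-- ===== PRECONDITION & SPEC =====
-- Pre_ excludes batch_dim_size = 0, on which Python A raises ZeroDivisionError.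
def Pre_compute_batch_sizes_py (total_dim : Int) (batch_dim_size : Int) : Prop := batch_dim_size ≠ 0
instance (total_dim : Int) (batch_dim_size : Int) : Decidable (Pre_compute_batch_sizes_py total_dim batch_dim_size) := by unfold Pre_compute_batch_sizes_py; infer_instance
def pvWitness_compute_batch_sizes_py : Int × Int := (7, 3)

-- When total_dim and batch_dim_size are both negative (and unequal), A's min-based loop returns an
-- accidental list (e.g. [-10,-3,-3,-3] for (-10,-3)) whose first element overshoots, while B returns
-- full batches plus a remainder summing to total_dim ([-3,-3,-3,-1]), the intended splitting.
def D_compute_batch_sizes_py (total_dim : Int) (batch_dim_size : Int) : Prop :=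
  total_dim < 0 ∧ batch_dim_size < 0 ∧ total_dim ≠ batch_dim_size
instance (total_dim : Int) (batch_dim_size : Int) : Decidable (D_compute_batch_sizes_py total_dim batch_dim_size) := by unfold D_compute_batch_sizes_py; infer_instance

def Spec_compute_batch_sizes_py (total_dim : Int) (batch_dim_size : Int) (out : List Int) : Prop := ¬ D_compute_batch_sizes_py total_dim batch_dim_size → out = compute_batch_sizes_py_alt total_dim batch_dim_size
instance (total_dim : Int) (batch_dim_size : Int) (out : List Int) : Decidable (Spec_compute_batch_sizes_py total_dim batch_dim_size out) := by unfold Spec_compute_batch_sizes_py; infer_instance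

def pvDiffWitness_compute_batch_sizes_py : Int × Int := (-10, -3)
def pvDiffWitnessOut_compute_batch_sizes_py : (List Int) × (List Int) := ([-10, -3, -3, -3], [-3, -3, -3, -1])

-- ===== CLAIM (what is proved, stated in full; the proofs are below) =====
def Claim_unchanged_compute_batch_sizes_py : Prop := ∀ (total_dim : Int) (batch_dim_size : Int), Dom_compute_batch_sizes_py total_dim batch_dim_size → Pre_compute_batch_sizes_py total_dim batch_dim_size → Spec_compute_batch_sizes_py total_dim batch_dim_size (compute_batch_sizes_py total_dim batch_dim_size)
def Claim_changed_compute_batch_sizes_py : Prop := Dom_compute_batch_sizes_py (pvDiffWitness_compute_batch_sizes_py.1) (pvDiffWitness_compute_batch_sizes_py.2) ∧ Pre_compute_batch_sizes_py (pvDiffWitness_compute_batch_sizes_py.1) (pvDiffWitness_compute_batch_sizes_py.2) ∧ D_compute_batch_sizes_py (pvDiffWitness_compute_batch_sizes_py.1) (pvDiffWitness_compute_batch_sizes_py.2) ∧ compute_batch_sizes_py (pvDiffWitness_compute_batch_sizes_py.1) (pvDiffWitness_compute_batch_sizes_py.2) = pvDiffWitnessOut_compute_batch_sizes_py.1 ∧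 compute_batch_sizes_py_alt (pvDiffWitness_compute_batch_sizes_py.1) (pvDiffWitness_compute_batch_sizes_py.2) = pvDiffWitnessOut_compute_batch_sizes_py.2 ∧ pvDiffWitnessOut_compute_batch_sizes_py.1 ≠ pvDiffWitnessOut_compute_batch_sizes_py.2
def Claim_exact_compute_batch_sizes_py : Prop := ∀ (total_dim : Int) (batch_dim_size : Int), Dom_compute_batch_sizes_py total_dim batch_dim_size → Pre_compute_batch_sizes_py total_dim batch_dim_size → D_compute_batch_sizes_py total_dim batch_dim_size → compute_batch_sizes_py total_dim batch_dim_size ≠ compute_batch_sizes_py_alt total_dim batch_dim_size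

-- ===== LEMMAS AND PROOFS =====

-- A's loop as structural recursion on the iteration count.
def pvLoopA (b : Int) : Nat → Int → List Int
  | 0, _ => []
  | m + 1, r => min b r :: pvLoopA b m (r - min b r)

theorem pvFold_eq (b : Int) (l : List Int) :
    ∀ (acc : List Int) (r : Int),
      (l.foldl (fun (st : List Int × Int) _ =>
        (st.1 ++ [min b st.2], st.2 - min b st.2)) (acc, r)).1
      = acc ++ pvLoopA b l.length r := by
  induction l with
  | nil => intro acc r; simp [pvLoopA]
  | cons x xs ih =>
      intro acc r
      simp only [List.foldl_cons, List.length_cons, pvLoopA, ih]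
      simp

theorem pvA_eq_loop (t b : Int) :
    compute_batch_sizes_py t b
      = pvLoopA b (-(PySem.Int.floordiv (-t) b)).toNat t := by
  unfold compute_batch_sizes_py
  rw [show (fun (st : List Int × Int) (_ : Int) =>
        let bs := min b st.2; (st.1 ++ [bs], st.2 - bs))
      = (fun (st : List Int × Int) _ => (st.1 ++ [min b st.2], st.2 - min b st.2)) from rfl]
  rw [pvFold_eq]
  simp [PySem.List.length_pyRange_one]

-- ceiling bounds for positive divisor
theorem pvCeil_bounds_pos (t b : Int) (hb : 0 < b) :
    ((-(PySem.Int.floordiv (-t) b)) - 1) * b < t ∧ t ≤ (-(PySem.Int.floordiv (-t) b)) * b :=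
  (PySem.Int.neg_floordiv_neg_eq_iff_of_pos (a := t) (b := b) (q := -(PySem.Int.floordiv (-t) b)) hb).mp rfl

-- ceiling bounds for negative divisor
theorem pvCeil_bounds_neg (t b : Int) (hb : b < 0) :
    (-(PySem.Int.floordiv (-t) b)) * b ≤ t ∧ t < ((-(PySem.Int.floordiv (-t) b)) - 1) * b := by
  have h1 := PySem.Int.floordiv_mul_add_mod (-t) b
  have h2 := PySem.Int.mod_neg_bounds (a := -t) (b := b) hb
  constructor <;> nlinarith [h1, h2.1, h2.2]

-- positive case: the loop unrolls to full batches plus remainder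
theorem pvLoop_pos (b : Int) (hb : 0 < b) :
    ∀ (m : Nat) (r : Int), (m : Int) * b < r → r ≤ ((m : Int) + 1) * b →
      pvLoopA b (m + 1) r = List.replicate m b ++ [r - (m : Int) * b] := by
  intro m
  induction m with
  | zero =>
      intro r h1 h2
      simp only [Nat.cast_zero, zero_mul] at h1 h2 ⊢
      have : min b r = r := by omega
      simp [pvLoopA, this]
  | succ m ih =>
      intro r h1 h2
      have hmb : (m : Int) * b ≥ 0 := by positivity
      have hle : b ≤ r := by push_cast at h1; nlinarith
      have hbr : min b r = b := min_eq_left hle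
      show min b r :: pvLoopA b (m + 1) (r - min b r) = _
      rw [hbr, ih (r - b) (by push_cast at h1 ⊢; nlinarith) (by push_cast at h2 ⊢; nlinarith)]
      simp only [List.replicate_succ, List.cons_append]
      congr 2
      push_cast; ring

theorem compute_batch_sizes_py_spec : Claim_unchanged_compute_batch_sizes_py := by
  intro t b _ hb hD
  unfold Pre_compute_batch_sizes_py at hb
  unfold D_compute_batch_sizes_py at hD
  push_neg at hD
  set n : Int := -(PySem.Int.floordiv (-t) b) with hn
  rw [pvA_eq_loop]
  unfold compute_batch_sizes_py_alt
  rw [← hn]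
  rcases lt_or_gt_of_ne hb with hbneg | hbpos
  · -- b < 0
    have hbd := pvCeil_bounds_neg t b hbneg
    rw [← hn] at hbd
    rcases le_or_gt 0 t with ht | ht
    · -- t ≥ 0 : n ≤ 0, both empty
      have hn0 : n ≤ 0 := by nlinarith [hbd.2]
      have : n.toNat = 0 := by omega
      simp [this, pvLoopA, hn0]
    · -- t < 0 and ¬D_ forces t = b, n = 1
      have htb : t = b := hD ht hbneg
      have hn1 : n = 1 := by nlinarith [hbd.1, hbd.2]
      have : n.toNat = 1 := by omega
      rw [this, hn1]
      simp [pvLoopA, htb]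
  · -- b > 0
    have hbd := pvCeil_bounds_pos t b hbpos
    rw [← hn] at hbd
    rcases le_or_gt n 0 with hn0 | hn0
    · have : n.toNat = 0 := by omega
      simp [this, pvLoopA, hn0]
    · -- n ≥ 1
      have hm : n.toNat = (n.toNat - 1) + 1 := by omega
      have hcast : ((n.toNat - 1 : Nat) : Int) = n - 1 := by omega
      rw [hm, pvLoop_pos b hbpos (n.toNat - 1) t
            (by rw [hcast]; exact hbd.1)
            (by rw [hcast]; simpa using hbd.2)]
      rw [if_neg (by omega)]
      show _ = List.replicate (n - 1).toNat b ++ [t - b * (n - 1)]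
      have h2 : (n - 1).toNat = n.toNat - 1 := by omega
      rw [hcast, h2, mul_comm b (n - 1)]

theorem compute_batch_sizes_py_changed : Claim_changed_compute_batch_sizes_py := by
  unfold Claim_changed_compute_batch_sizes_py; decide

theorem compute_batch_sizes_py_tight : Claim_exact_compute_batch_sizes_py := by
  intro t b _ hb hD
  obtain ⟨ht, hbneg, htb⟩ := hD
  set n : Int := -(PySem.Int.floordiv (-t) b) with hn
  have hbd := pvCeil_bounds_neg t b hbneg
  rw [← hn] at hbd
  have hn1 : 1 ≤ n := by nlinarith [hbd.1]
  rw [pvA_eq_loop, ← hn]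
  unfold compute_batch_sizes_py_alt
  rw [← hn, if_neg (by omega)]
  show pvLoopA b n.toNat t ≠ List.replicate (n - 1).toNat b ++ [t - b * (n - 1)]
  rcases eq_or_lt_of_le hn1 with hone | htwo
  · -- n = 1: A = [min b t] = [b] (b ≤ t here), B = [t]
    have hbt : b ≤ t := by nlinarith [hbd.2, hone]
    have : n.toNat = 1 := by omega
    rw [this, ← hone]
    simp [pvLoopA, min_eq_left hbt]
    omega
  · -- n ≥ 2: A's head is min b t = t (t < b here), B's head is b
    have htb' : t < b := by nlinarith [hbd.1, htwo]
    have : n.toNat = (n.toNat - 1) + 1 := by omega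
    rw [this]
    have hfull : (n - 1).toNat = (n - 2).toNat + 1 := by omega
    rw [hfull]
    simp only [pvLoopA, List.replicate_succ, List.cons_append]
    intro hcontra
    have := List.head_eq_of_cons_eq hcontra
    rw [min_eq_right (le_of_lt htb')] at this
    omega

-- ===== VERDICT (by name: the statement is the Claim_ definition above) =====
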